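-- pv_equiv track=rewrite | github.com/lucifer1198/Codesignal | solutions/python/2018/countSumOfTwoRepresentations3.py | countSumOfTwoRepresentations3
-- ===== SOURCE A (Python) =====
-- def countSumOfTwoRepresentations3(n, l, r):
--     result = 0
--     i = 1
--     while (i <= n - i):
--         if (l <= i and n - i <= r):
--             result = result + 1
--         i = i + 1
--     return result
-- ===== SOURCE B (Python) =====
-- def countSumOfTwoRepresentations3(n, l, r):
--     lo = max(1, l, n - r)
--     hi = n // 2
--     return max(0, hi - lo + 1)
-- ===== Notes on version B (the rewrite author's own statement) =====
-- stated objective: faster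
-- what changed: Replaced the O(n) while-loop counting i in [1, n/2] with l <= i and n-i <= r by the closed-form interval count max(0, n//2 - max(1, l, n-r) + 1).
import Mathlib
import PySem

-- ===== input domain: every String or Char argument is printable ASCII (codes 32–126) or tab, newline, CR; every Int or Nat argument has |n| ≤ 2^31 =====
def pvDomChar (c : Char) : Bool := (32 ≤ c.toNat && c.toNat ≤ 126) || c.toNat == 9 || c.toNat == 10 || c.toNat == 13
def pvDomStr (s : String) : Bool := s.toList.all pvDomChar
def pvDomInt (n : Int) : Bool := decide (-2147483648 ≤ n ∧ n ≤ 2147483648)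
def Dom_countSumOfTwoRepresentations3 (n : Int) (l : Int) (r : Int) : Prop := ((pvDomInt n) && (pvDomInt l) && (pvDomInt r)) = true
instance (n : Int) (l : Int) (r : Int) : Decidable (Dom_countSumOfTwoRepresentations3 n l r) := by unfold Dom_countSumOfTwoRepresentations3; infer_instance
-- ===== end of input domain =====

-- B replaces A's O(n) counting loop with the closed-form interval count (objective: faster, asymptotic).

-- ===== PORT A =====
-- the while loop of A, with state (i, result)
def csLoopA (n l r i result : Int) : Int :=
  if i ≤ n - i then
    csLoopA n l r (i + 1) (if l ≤ i ∧ n - i ≤ r then result + 1 else result)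
  else result
termination_by (n - 2 * i + 1).toNat
decreasing_by omega

def countSumOfTwoRepresentations3 (n : Int) (l : Int) (r : Int) : Int :=
  csLoopA n l r 1 0

-- ===== PORT B =====
def countSumOfTwoRepresentations3_alt (n : Int) (l : Int) (r : Int) : Int :=
  let lo := max (max 1 l) (n - r)
  let hi := PySem.Int.floordiv n 2
  max 0 (hi - lo + 1)

-- ===== PRECONDITION & SPEC =====
def Spec_countSumOfTwoRepresentations3 (n : Int) (l : Int) (r : Int) (out : Int) : Prop := out = countSumOfTwoRepresentations3_alt n l r
instance (n : Int) (l : Int) (r : Int) (out : Int) : Decidable (Spec_countSumOfTwoRepresentations3 n l r out) := by unfold Spec_countSumOfTwoRepresentations3; infer_instance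

-- ===== CLAIM (what is proved, stated in full; the proofs are below) =====
def Claim_equal_countSumOfTwoRepresentations3 : Prop := ∀ (n : Int) (l : Int) (r : Int), Dom_countSumOfTwoRepresentations3 n l r → Spec_countSumOfTwoRepresentations3 n l r (countSumOfTwoRepresentations3 n l r)

-- ===== LEMMAS AND PROOFS =====

-- loop invariant: from state (i, result) the loop returns result plus the number of
-- eligible j in [i, n/2], which is max 0 (n/2 - max i (max l (n-r)) + 1)
lemma csLoopA_eq (n l r i result : Int) :
    csLoopA n l r i result = result + max 0 (n / 2 - max i (max l (n - r)) + 1) := by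
  rw [csLoopA]
  split
  · rw [csLoopA_eq]
    split <;> omega
  · omega
termination_by (n - 2 * i + 1).toNat
decreasing_by omega

-- ===== VERDICT (by name: the statement is the Claim_ definition above) =====
theorem countSumOfTwoRepresentations3_spec : Claim_equal_countSumOfTwoRepresentations3 := by
  intro n l r _
  show _ = _
  rw [countSumOfTwoRepresentations3, csLoopA_eq,
    countSumOfTwoRepresentations3_alt]
  rw [PySem.Int.floordiv_eq_ediv_of_pos (by omega)]
  omega
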